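-- pv_equiv track=rewrite | github.com/steveandjeff999/Obsidianscout | app/utils/event_code_utils.py | normalize_event_code
-- ===== SOURCE A (Python) =====
-- def normalize_event_code(value):
--     """Return a normalized uppercase event code string.
--
--     Also heals malformed duplicated-year prefixes such as ``20262026ARLI``.
--     """
--     if value is None:
--         return ""
--
--     try:
--         code = str(value).strip().upper()
--     except Exception:
--         return ""
--
--     if not code:
--         return ""
--
--     # Heal repeated year prefixes: 20262026ARLI -> 2026ARLI.
--     # Loop handles pathological repeats like 202620262026ARLI.
--     while len(code) >= 8 and code[:4].isdigit() and code[4:8] == code[:4]: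
--         code = code[:4] + code[8:]
--
--     return code
-- ===== SOURCE B (Python) =====
-- def normalize_event_code(value):
--     """Return a normalized uppercase event code string.
--
--     Single forward scan: find the run of repeated 4-char digit prefixes
--     once, then rebuild the string once.
--     """
--     if value is None:
--         return ""
--
--     try:
--         code = str(value).strip().upper()
--     except Exception:
--         return ""
--
--     if not code:
--         return ""
--
--     p = code[:4]
--     if p.isdigit():
--         i = 4
--         while code[i:i+4] == p:
--             i += 4
--         code = p + code[i:]
--
--     return code
-- ===== Notes on version B (the rewrite author's own statement) =====
-- stated objective: alternative
-- what changed: A repeatedly re-slices the string from the front (code = code[:4] + code[8:]) once per duplicated year block; B scans forward once with an index to find the end of the run of repeated 4-char digit prefixes and rebuilds the string a single time.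
import Mathlib
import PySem

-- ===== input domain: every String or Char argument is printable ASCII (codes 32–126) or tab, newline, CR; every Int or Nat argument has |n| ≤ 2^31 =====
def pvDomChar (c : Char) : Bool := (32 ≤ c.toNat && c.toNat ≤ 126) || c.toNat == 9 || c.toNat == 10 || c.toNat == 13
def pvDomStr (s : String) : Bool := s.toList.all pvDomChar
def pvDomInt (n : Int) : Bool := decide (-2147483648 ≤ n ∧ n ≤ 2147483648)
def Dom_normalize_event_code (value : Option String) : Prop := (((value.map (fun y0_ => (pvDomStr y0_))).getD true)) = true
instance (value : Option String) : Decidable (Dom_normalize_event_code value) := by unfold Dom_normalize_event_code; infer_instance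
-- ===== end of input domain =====

-- B replaces A's repeated front-slicing while-loop by one forward index scan that
-- finds the run of repeated 4-char digit prefixes and rebuilds the string once (objective: alternative).

-- ===== PORT A =====
-- termination helper for A's while loop (each iteration shortens code by 4)
theorem pvLoopA_dec (code : List Char) (h8 : 8 ≤ code.length) :
    (PySem.Chars.slice code none (some 4) ++ PySem.Chars.slice code (some 8) none).length < code.length := by
  rw [PySem.Chars.slice_eq_listSlice, PySem.Chars.slice_eq_listSlice,
      PySem.List.slice_to _ (by norm_num), PySem.List.slice_from _ (by norm_num)]
  simp
  omega

-- the 'while' loop of A: while len(code) >= 8 and code[:4].isdigit() and code[4:8] == code[:4]: code = code[:4] + code[8:]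
def pyLoopA (code : List Char) : List Char :=
  if h : 8 ≤ code.length ∧ PySem.Chars.strIsdigit (PySem.Chars.slice code none (some 4)) = true ∧
      PySem.Chars.slice code (some 4) (some 8) = PySem.Chars.slice code none (some 4) then
    pyLoopA (PySem.Chars.slice code none (some 4) ++ PySem.Chars.slice code (some 8) none)
  else code
termination_by code.length
decreasing_by exact pvLoopA_dec code h.1

def normalize_event_code (value : Option String) : String :=
  match value with
  | none => ""
  | some v =>
    let code := PySem.Chars.upper (PySem.Chars.strip v.toList)
    if code = [] then "" else String.ofList (pyLoopA code)

-- ===== PORT B =====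
-- ''.isdigit() is False, so a prefix that passes isdigit is nonempty
theorem pvIsdigit_ne_nil {s : List Char} (h : PySem.Chars.strIsdigit s = true) : s ≠ [] := by
  cases s with
  | nil => simp [PySem.Chars.strIsdigit] at h
  | cons a t => simp

-- code[i:i+4] as drop/take (termination helper for the scan)
theorem pvScan_slice (code : List Char) (i : Nat) :
    PySem.Chars.slice code (some (i : Int)) (some ((i : Int) + 4)) = (code.drop i).take 4 := by
  rw [PySem.Chars.slice_eq_listSlice, PySem.List.slice_toNat _ (by positivity) (by positivity)]
  have h2 : ((i : Int) + 4).toNat = i + 4 := by omega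
  simp [h2]

-- the 'while' loop of B: i = 4; while code[i:i+4] == p: i += 4  (p nonempty)
def pyScanB (code p : List Char) (hp : p ≠ []) (i : Nat) : Nat :=
  if h : PySem.Chars.slice code (some (i : Int)) (some ((i : Int) + 4)) = p then
    pyScanB code p hp (i + 4)
  else i
termination_by code.length - i
decreasing_by
  rw [pvScan_slice] at h
  have hne : (code.drop i) ≠ [] := by
    intro hnil; rw [hnil] at h; simp at h; exact hp h
  have : i < code.length := by
    by_contra hc
    exact hne (List.drop_eq_nil_of_le (by omega))
  omega

def normalize_event_code_alt (value : Option String) : String :=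
  match value with
  | none => ""
  | some v =>
    let code := PySem.Chars.upper (PySem.Chars.strip v.toList)
    if code = [] then ""
    else
      let p := PySem.Chars.slice code none (some 4)
      if hp : PySem.Chars.strIsdigit p = true then
        String.ofList (p ++
          PySem.Chars.slice code (some ((pyScanB code p (pvIsdigit_ne_nil hp) 4 : Nat) : Int)) none)
      else String.ofList code

-- ===== PRECONDITION & SPEC =====
def Spec_normalize_event_code (value : Option String) (out : String) : Prop := out = normalize_event_code_alt value
instance (value : Option String) (out : String) : Decidable (Spec_normalize_event_code value out) := by unfold Spec_normalize_event_code; infer_instance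

-- ===== CLAIM (what is proved, stated in full; the proofs are below) =====
def Claim_equal_normalize_event_code : Prop := ∀ (value : Option String), Dom_normalize_event_code value → Spec_normalize_event_code value (normalize_event_code value)

-- ===== LEMMAS AND PROOFS =====

theorem pvSlice_take4 (code : List Char) :
    PySem.Chars.slice code none (some 4) = code.take 4 := by
  rw [PySem.Chars.slice_eq_listSlice, PySem.List.slice_to _ (by norm_num)]
  rfl

theorem pvSlice48 (code : List Char) :
    PySem.Chars.slice code (some 4) (some 8) = (code.drop 4).take 4 := by
  rw [PySem.Chars.slice_eq_listSlice, PySem.List.slice_toNat _ (by norm_num) (by norm_num)]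
  rfl

theorem pvSlice_drop8 (code : List Char) :
    PySem.Chars.slice code (some 8) none = code.drop 8 := by
  rw [PySem.Chars.slice_eq_listSlice, PySem.List.slice_from _ (by norm_num)]
  rfl

theorem pvSlice_dropI (code : List Char) (i : Nat) :
    PySem.Chars.slice code (some (i : Nat)) none = code.drop i := by
  rw [PySem.Chars.slice_eq_listSlice, PySem.List.slice_from _ (by positivity)]
  simp

-- when code[4:8] == code[:4] and len >= 8, stripping the duplicate block is dropping 4 chars
theorem pvDrop4 (code : List Char) (heq : (code.drop 4).take 4 = code.take 4) :
    code.take 4 ++ code.drop 8 = code.drop 4 := by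
  have : code.drop 4 = (code.drop 4).take 4 ++ (code.drop 4).drop 4 := (List.take_append_drop 4 _).symm
  rw [this, heq, List.drop_drop]

-- unfold pyScanB once when the guard holds / fails
theorem pyScanB_pos (code p : List Char) (hp : p ≠ []) (i : Nat)
    (h : PySem.Chars.slice code (some (i : Int)) (some ((i : Int) + 4)) = p) :
    pyScanB code p hp i = pyScanB code p hp (i + 4) := by
  conv_lhs => rw [pyScanB]
  exact dif_pos h

theorem pyScanB_neg (code p : List Char) (hp : p ≠ []) (i : Nat)
    (h : ¬ PySem.Chars.slice code (some (i : Int)) (some ((i : Int) + 4)) = p) :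
    pyScanB code p hp i = i := by
  conv_lhs => rw [pyScanB]
  exact dif_neg h

-- the scan over code starting at i+4 is the scan over code.drop 4 starting at i, shifted by 4
theorem pvScanShift (code p : List Char) (hp : p ≠ []) : ∀ i, pyScanB code p hp (i + 4) = pyScanB (code.drop 4) p hp i + 4 := by
  intro i
  induction hm : code.length - i using Nat.strong_induction_on generalizing i with
  | _ m ih =>
  by_cases h : PySem.Chars.slice (code.drop 4) (some (i : Int)) (some ((i : Int) + 4)) = p
  · have h' : PySem.Chars.slice code (some ((i + 4 : Nat) : Int)) (some (((i + 4 : Nat) : Int) + 4)) = p := by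
      rw [pvScan_slice] at h ⊢
      rw [show i + 4 = 4 + i from by omega, ← List.drop_drop]
      exact h
    have hlt : i < (code.drop 4).length := by
      by_contra hc
      rw [pvScan_slice] at h
      have hnil : ((code.drop 4).drop i) = [] := List.drop_eq_nil_of_le (by omega)
      rw [hnil] at h
      simp at h
      exact hp h
    rw [pyScanB_pos _ _ _ _ h, pyScanB_pos _ _ _ _ (by exact_mod_cast h')]
    have := ih (code.length - (i + 4)) (by simp at hlt; omega) (i + 4) rfl
    rw [show i + 4 + 4 = (i + 4) + 4 from rfl]
    exact this
  · have h' : ¬ PySem.Chars.slice code (some ((i + 4 : Nat) : Int)) (some (((i + 4 : Nat) : Int) + 4)) = p := by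
      rw [pvScan_slice] at h ⊢
      rw [show i + 4 = 4 + i from by omega, ← List.drop_drop]
      exact h
    rw [pyScanB_neg _ _ _ _ h, pyScanB_neg _ _ _ _ (by exact_mod_cast h')]

-- if len(code) < 8 then code[4:8] cannot equal the (nonempty) 4-char prefix
theorem pvShort_neq (code : List Char) (hp : code.take 4 ≠ [])
    (hlt : code.length < 8) : (code.drop 4).take 4 ≠ code.take 4 := by
  intro h
  have hl := congrArg List.length h
  have h0 : code ≠ [] := by intro h0; rw [h0] at hp; simp at hp
  have hpos : 0 < code.length := List.length_pos_iff.mpr h0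
  simp [List.length_take, List.length_drop] at hl
  omega

-- pyScanB depends on p only through its value (the nonemptiness proof is irrelevant)
theorem pvScanB_congr (code p q : List Char) (hp : p ≠ []) (hq : q ≠ []) (i : Nat)
    (h : p = q) : pyScanB code p hp i = pyScanB code q hq i := by
  subst h; rfl

-- A's loop characterised by B's scan
theorem pvLoopA_eq (code : List Char) (hd : PySem.Chars.strIsdigit (code.take 4) = true) :
    pyLoopA code = code.take 4 ++ code.drop (pyScanB code (code.take 4) (pvIsdigit_ne_nil hd) 4) := by
  induction hn : code.length using Nat.strong_induction_on generalizing code with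
  | _ n ih =>
  rw [pyLoopA]
  rw [pvSlice_take4, pvSlice48, pvSlice_drop8]
  by_cases hg : 8 ≤ code.length ∧ PySem.Chars.strIsdigit (code.take 4) = true ∧ (code.drop 4).take 4 = code.take 4
  · rw [dif_pos hg]
    obtain ⟨h8, -, heq⟩ := hg
    rw [pvDrop4 code heq]
    have hd' : PySem.Chars.strIsdigit ((code.drop 4).take 4) = true := by
      rw [List.take_drop] at heq ⊢
      rw [show 4 + 4 = 8 from rfl] at heq ⊢
      rw [heq]; exact hd
    have hlen : (code.drop 4).length < n := by simp; omega
    rw [ih _ hlen (code.drop 4) hd' rfl]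
    have h4 : PySem.Chars.slice code (some ((4 : Nat) : Int)) (some (((4 : Nat) : Int) + 4)) =
        code.take 4 := by
      rw [pvScan_slice]; exact heq
    have hscan : pyScanB code (code.take 4) (pvIsdigit_ne_nil hd) 4 =
        pyScanB (code.drop 4) (code.take 4) (pvIsdigit_ne_nil hd) 4 + 4 := by
      rw [pyScanB_pos _ _ _ 4 (by exact_mod_cast h4)]
      exact pvScanShift code (code.take 4) (pvIsdigit_ne_nil hd) 4
    rw [pvScanB_congr (code.drop 4) _ _ (pvIsdigit_ne_nil hd') (pvIsdigit_ne_nil hd) 4 heq]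
    rw [heq, hscan, List.drop_drop, Nat.add_comm]
  · rw [dif_neg hg]
    have hne : (code.drop 4).take 4 ≠ code.take 4 := by
      rcases not_and_or.mp hg with h | h
      · exact pvShort_neq code (pvIsdigit_ne_nil hd) (by omega)
      · rcases not_and_or.mp h with h' | h'
        · exact absurd hd h'
        · exact h'
    have h4 : ¬ PySem.Chars.slice code (some ((4 : Nat) : Int)) (some (((4 : Nat) : Int) + 4)) =
        code.take 4 := by
      rw [pvScan_slice]; exact hne
    rw [pyScanB_neg _ _ _ 4 (by exact_mod_cast h4)]
    exact (List.take_append_drop 4 code).symm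

-- ===== VERDICT (by name: the statement is the Claim_ definition above) =====
theorem normalize_event_code_spec : Claim_equal_normalize_event_code := by
  intro value _
  unfold Spec_normalize_event_code normalize_event_code normalize_event_code_alt
  cases value with
  | none => rfl
  | some v =>
    simp only
    set code := PySem.Chars.upper (PySem.Chars.strip v.toList) with hcode
    by_cases hnil : code = []
    · rw [if_pos hnil, if_pos hnil]
    · rw [if_neg hnil, if_neg hnil]
      simp only [pvSlice_take4, pvSlice_dropI]
      by_cases hdig : PySem.Chars.strIsdigit (code.take 4) = true
      · rw [dif_pos hdig, pvLoopA_eq code hdig]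
      · rw [dif_neg hdig]
        rw [pyLoopA, dif_neg (by rw [pvSlice_take4]; intro h; exact hdig h.2.1)]
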